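-- pv_equiv track=rewrite | github.com/rahul38888/coding_practice | src/practices/practice/largest_lex_k_consecutive/script.py | lex_largest_k_consecutive
-- ===== SOURCE A (Python) =====
-- def lex_largest_k_consecutive(string: str, k_value):
--     char_count = [0] * 26
--     for n in range(len(string)):
--         char_count[ord(string[n]) - ord('a')] += 1
--
--     m, j = 25, 25
--     result = ""
--     while m >= 0 and j >= 0:
--         if j == m:
--             if char_count[m] > k_value:
--                 result += chr(m + ord('a')) * k_value
--                 char_count[m] -= k_value
--                 j -= 1
--             elif char_count[m] > 0:
--                 result += chr(m + ord('a')) * char_count[m]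
--                 char_count[m] = 0
--                 m -= 1
--                 j = m
--             else:
--                 m -= 1
--                 j = m
--         else:
--             if char_count[j] > 0:
--                 result += chr(j + ord('a'))
--                 char_count[j] -= 1
--                 j = m
--             else:
--                 j -= 1
--
--     return result
-- ===== SOURCE B (Python) =====
-- def lex_largest_k_consecutive(string: str, k_value):
--     count = [0] * 26
--     for ch in string:
--         count[ord(ch) - ord('a')] += 1
--     desc = ''.join(chr(m + ord('a')) * count[m] for m in range(25, -1, -1))
--
--     out = []
--     rest = desc
--     while rest:
--         c = rest[0]
--         run = 1
--         while run < len(rest) and rest[run] == c: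
--             run += 1
--         remaining, rest = run, rest[run:]
--         while remaining > k_value:
--             out.append(c * k_value)
--             remaining -= k_value
--             if not rest:
--                 return ''.join(out)
--             out.append(rest[0])
--             rest = rest[1:]
--         out.append(c * remaining)
--     return ''.join(out)
-- ===== Notes on version B (the rewrite author's own statement) =====
-- stated objective: alternative
-- what changed: A runs a state machine over the mutable 26-entry count array, with a shared (m, j) pointer pair that interleaves block emission and separator search and re-reads/writes counts throughout; B instead materializes the descending multiset as one flattened string and does a single left-to-right consuming scan over it (run detection plus taking separators directly from the front of the remaining suffix), with no mutable counts during reconstruction.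
-- outside the precondition, e.g. on lex_largest_k_consecutive('{', 1): A raises IndexError, B raises IndexError; on lex_largest_k_consecutive('ab', -1): A returns 'ba', B returns 'a'; on lex_largest_k_consecutive('a', -1): A returns 'a', B returns ''
import Mathlib
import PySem

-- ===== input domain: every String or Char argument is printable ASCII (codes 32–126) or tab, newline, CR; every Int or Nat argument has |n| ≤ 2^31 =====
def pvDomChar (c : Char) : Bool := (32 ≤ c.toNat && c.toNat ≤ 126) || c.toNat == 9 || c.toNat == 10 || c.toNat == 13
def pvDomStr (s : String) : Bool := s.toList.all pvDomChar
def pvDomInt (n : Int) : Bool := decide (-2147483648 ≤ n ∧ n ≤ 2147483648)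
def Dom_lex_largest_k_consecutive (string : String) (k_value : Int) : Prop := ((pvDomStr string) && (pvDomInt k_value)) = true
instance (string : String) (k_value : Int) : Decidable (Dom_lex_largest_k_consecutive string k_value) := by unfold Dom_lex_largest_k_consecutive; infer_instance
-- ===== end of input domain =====

-- B replaces A's (m, j) state machine over the mutable count array by one consuming
-- left-to-right scan over the flattened descending multiset string (objective:
-- alternative algorithm of the same cost).

-- ===== PORT A =====
-- small arithmetic/order facts used by the ports' termination proofs
lemma pvInt_lt_toNat {m : Int} (hm : 0 ≤ m) : m.toNat < (m + 1).toNat :=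
  (Int.toNat_lt_toNat (add_pos_of_nonneg_of_pos hm zero_lt_one)).mpr (lt_add_one m)

lemma pvPred_lt {c : Int} (hc : 0 < c) : (c - 1).toNat < c.toNat :=
  (Int.toNat_lt_toNat hc).mpr (sub_lt_self c zero_lt_one)

lemma pvLex4_1 {a a' b b' c c' d d' : Nat} (h : a < a') :
    Prod.Lex (· < ·) (Prod.Lex (· < ·) (Prod.Lex (· < ·) (· < ·))) (a, b, c, d) (a', b', c', d') :=
  Prod.Lex.left _ _ h

lemma pvLex4_2 {a b b' c c' d d' : Nat} (h : b < b') :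
    Prod.Lex (· < ·) (Prod.Lex (· < ·) (Prod.Lex (· < ·) (· < ·))) (a, b, c, d) (a, b', c', d') :=
  Prod.Lex.right _ (Prod.Lex.left _ _ h)

lemma pvLex4_3 {a b c c' d d' : Nat} (h : c < c') :
    Prod.Lex (· < ·) (Prod.Lex (· < ·) (Prod.Lex (· < ·) (· < ·))) (a, b, c, d) (a, b, c', d') :=
  Prod.Lex.right _ (Prod.Lex.right _ (Prod.Lex.left _ _ h))

lemma pvLex4_4 {a b c d d' : Nat} (h : d < d') :
    Prod.Lex (· < ·) (Prod.Lex (· < ·) (Prod.Lex (· < ·) (· < ·))) (a, b, c, d) (a, b, c, d') :=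
  Prod.Lex.right _ (Prod.Lex.right _ (Prod.Lex.right _ h))

lemma pvLex4_3e {a b b' c c' d d' : Nat} (hb : b = b') (h : c < c') :
    Prod.Lex (· < ·) (Prod.Lex (· < ·) (Prod.Lex (· < ·) (· < ·))) (a, b, c, d) (a, b', c', d') :=
  hb ▸ pvLex4_3 h

lemma pvLex4_4e {a b c c' d d' : Nat} (hc : c = c') (h : d < d') :
    Prod.Lex (· < ·) (Prod.Lex (· < ·) (Prod.Lex (· < ·) (· < ·))) (a, b, c, d) (a, b, c', d') :=
  hc ▸ pvLex4_4 h

lemma pvDecJ {j : Int} (hj : 0 ≤ j) : (j - 1 + 1).toNat < (j + 1).toNat := by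
  rw [sub_add_cancel]
  exact pvInt_lt_toNat hj

-- third measure component of A's loop: in which of the three j-regimes the state is
def pvPhase (m j : Int) : Nat := if m < j then 2 else if m ≤ j then 1 else 0

lemma pvPhase1 {m j : Int} (hjm : j = m) : pvPhase m (j - 1) < pvPhase m j := by
  unfold pvPhase
  subst hjm
  rw [if_neg (not_lt.mpr (sub_le_self j zero_le_one)),
    if_neg (not_le.mpr (sub_lt_self j zero_lt_one)),
    if_neg (lt_irrefl j), if_pos le_rfl]
  exact Nat.zero_lt_one

lemma pvPhase4 {m j : Int} (hgt : m < j) : pvPhase m m < pvPhase m j := by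
  unfold pvPhase
  rw [if_neg (lt_irrefl m), if_pos le_rfl, if_pos hgt]
  exact Nat.one_lt_two

lemma pvPhase5a {m j : Int} (hlt : j < m) : pvPhase m (j - 1) = pvPhase m j := by
  unfold pvPhase
  rw [if_neg (not_lt.mpr ((sub_le_self j zero_le_one).trans hlt.le)),
    if_neg (not_le.mpr (lt_of_le_of_lt (sub_le_self j zero_le_one) hlt)),
    if_neg (not_lt.mpr hlt.le), if_neg (not_le.mpr hlt)]

lemma pvPhase5b {m j : Int} (hgt : m < j) :
    pvPhase m (j - 1) = pvPhase m j ∨ pvPhase m (j - 1) < pvPhase m j := by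
  unfold pvPhase
  rw [if_pos hgt]
  by_cases hj1 : m < j - 1
  · rw [if_pos hj1]
    exact Or.inl rfl
  · rw [if_neg hj1, if_pos (Int.le_sub_one_iff.mpr hgt)]
    exact Or.inr Nat.one_lt_two

-- chr(x + 97) repeated t times (Python's `chr(m + ord('a')) * t`; negative t gives "")
def pvRepChar (mi t : Int) : List Char := List.replicate t.toNat (Char.ofNat (mi.toNat + 97))

-- the counting loop `for n in range(len(string)): char_count[ord(string[n]) - ord('a')] += 1`
-- (identical in A and in B); pySetD/pyGetD carry Python's negative-index semantics
def pvCharCount (s : List Char) : List Int :=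
  s.foldl (fun cc c =>
      PySem.List.pySetD cc ((c.toNat : Int) - 97)
        (PySem.List.pyGetD cc ((c.toNat : Int) - 97) 0 + 1))
    (List.replicate 26 (0 : Int))

-- termination measure component: sum of the (clamped) counts strictly below index m
def pvSlow (cs : List Int) (m : Int) : Nat := ((cs.take m.toNat).map Int.toNat).sum

-- a write at a nonnegative index is List.set (out of range: both are the identity)
lemma pvSetD_nonneg_eq (cs : List Int) (i v : Int) (h : 0 ≤ i) :
    PySem.List.pySetD cs i v = cs.set i.toNat v := by
  unfold PySem.List.pySetD PySem.List.pySet? PySem.List.pyIdx?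
  rw [if_pos h]
  by_cases hlt : i < (cs.length : Int)
  · rw [if_pos hlt]; rfl
  · rw [if_neg hlt]
    exact (List.set_eq_of_length_le
      (Int.toNat_natCast cs.length ▸ Int.toNat_le_toNat (not_lt.mp hlt))).symm

-- a read at a nonnegative index is List.getD
lemma pvGetD_nonneg_eq (cs : List Int) (i : Int) (h : 0 ≤ i) :
    PySem.List.pyGetD cs i 0 = cs.getD i.toNat 0 := by
  rw [PySem.List.pyGetD, PySem.List.pyGet?_of_nonneg cs h, List.getD]

lemma pvSumSetLt (L : List Nat) : ∀ (n : Nat) (v : Nat) (hn : n < L.length),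
    v < L[n] → (L.set n v).sum < L.sum := by
  induction L with
  | nil => intro n v hn _; exact absurd hn (Nat.not_lt_zero n)
  | cons a t ih =>
    intro n v hn hv
    cases n with
    | zero =>
      rw [List.set_cons_zero, List.sum_cons, List.sum_cons]
      rw [List.getElem_cons_zero] at hv
      exact Nat.add_lt_add_right hv t.sum
    | succ n =>
      rw [List.set_cons_succ, List.sum_cons, List.sum_cons]
      rw [List.getElem_cons_succ] at hv
      exact Nat.add_lt_add_left (ih n v (Nat.lt_of_succ_lt_succ hn) hv) a

lemma pvSlow_set_ge (cs : List Int) (m i v : Int) (hm : 0 ≤ m) (hi : m ≤ i) :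
    pvSlow (PySem.List.pySetD cs i v) m = pvSlow cs m := by
  rw [pvSetD_nonneg_eq cs i v (hm.trans hi)]
  unfold pvSlow
  rw [List.take_set, List.set_eq_of_length_le
    ((List.length_take_le m.toNat cs).trans (Int.toNat_le_toNat hi))]

lemma pvSlow_set_dec (cs : List Int) (m j : Int) (hj : 0 ≤ j) (hjm : j < m)
    (hp : 0 < PySem.List.pyGetD cs j 0) :
    pvSlow (PySem.List.pySetD cs j (PySem.List.pyGetD cs j 0 - 1)) m < pvSlow cs m := by
  rw [pvSetD_nonneg_eq cs j _ hj]
  rw [pvGetD_nonneg_eq cs j hj] at hp ⊢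
  have hlen : j.toNat < cs.length := by
    by_cases hge : j.toNat < cs.length
    · exact hge
    · exact absurd (List.getD_eq_default cs 0 (not_lt.mp hge) ▸ hp) (lt_irrefl 0)
  have hjmn : j.toNat < m.toNat :=
    (Int.toNat_lt_toNat (hj.trans_lt hjm)).mpr hjm
  unfold pvSlow
  rw [List.take_set, List.map_set, List.getD_eq_getElem cs 0 hlen]
  have hn : j.toNat < ((cs.take m.toNat).map Int.toNat).length := by
    rw [List.length_map, List.length_take]
    exact lt_min hjmn hlen
  refine pvSumSetLt _ j.toNat _ hn ?_
  rw [List.getElem_map, List.getElem_take]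
  exact pvPred_lt (List.getD_eq_getElem cs 0 hlen ▸ hp)

-- the while loop of A: state (char_count, m, j, result)
def pvLoopA (cs : List Int) (m j k : Int) (res : List Char) : List Char :=
  if hg : 0 ≤ m ∧ 0 ≤ j then
    if hjm : j = m then
      if h1 : k < PySem.List.pyGetD cs m 0 then
        pvLoopA (PySem.List.pySetD cs m (PySem.List.pyGetD cs m 0 - k)) m (j - 1) k
          (res ++ pvRepChar m k)
      else if h2 : 0 < PySem.List.pyGetD cs m 0 then
        pvLoopA (PySem.List.pySetD cs m 0) (m - 1) (m - 1) k
          (res ++ pvRepChar m (PySem.List.pyGetD cs m 0))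
      else
        pvLoopA cs (m - 1) (m - 1) k res
    else
      if h3 : 0 < PySem.List.pyGetD cs j 0 then
        pvLoopA (PySem.List.pySetD cs j (PySem.List.pyGetD cs j 0 - 1)) m m k
          (res ++ [Char.ofNat (j.toNat + 97)])
      else
        pvLoopA cs m (j - 1) k res
  else res
termination_by ((m + 1).toNat, pvSlow cs m, pvPhase m j, (j + 1).toNat)
decreasing_by
  · exact pvLex4_3e (pvSlow_set_ge cs m m _ hg.1 le_rfl) (pvPhase1 hjm)
  · exact pvLex4_1 (pvDecJ hg.1)
  · exact pvLex4_1 (pvDecJ hg.1)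
  · rcases lt_or_gt_of_ne hjm with hlt | hgt
    · exact pvLex4_2 (pvSlow_set_dec cs m j hg.2 hlt h3)
    · exact pvLex4_3e (pvSlow_set_ge cs m j _ hg.1 hgt.le) (pvPhase4 hgt)
  · rcases lt_or_gt_of_ne hjm with hlt | hgt
    · exact pvLex4_4e (pvPhase5a hlt) (pvDecJ hg.2)
    · rcases pvPhase5b hgt with he | hl
      · exact pvLex4_4e he (pvDecJ hg.2)
      · exact pvLex4_3e rfl hl

def lex_largest_k_consecutive (string : String) (k_value : Int) : String :=
  String.ofList (pvLoopA (pvCharCount string.toList) 25 25 k_value [])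

-- ===== PORT B =====
-- `run = 1; while run < len(rest) and rest[run] == c: run += 1` — the leading run length
def pvRunLen (c : Char) : List Char → Nat
  | [] => 0
  | x :: xs => if x = c then pvRunLen c xs + 1 else 0

-- the outer `while rest:` loop and the inner `while remaining > k_value:` loop of Source B,
-- as mutual tail recursion over the consumed suffix `rest`
lemma pvRunLen_cons_self (c : Char) (t : List Char) :
    pvRunLen c (c :: t) = pvRunLen c t + 1 := by
  simp [pvRunLen]

mutual
def pvOuter (rest : List Char) (k : Int) : List (List Char) :=
  match rest with
  | [] => []
  | c :: t =>
      pvGo c ((pvRunLen c (c :: t) : Nat) : Int) k ((c :: t).drop (pvRunLen c (c :: t)))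
termination_by (rest.length, 0)
decreasing_by
  exact Prod.Lex.left _ _ (by simp [pvRunLen_cons_self])

def pvGo (c : Char) (remaining k : Int) (rest : List Char) : List (List Char) :=
  if k < remaining then
    match rest with
    | [] => [List.replicate k.toNat c]
    | s :: rest' => List.replicate k.toNat c :: [s] :: pvGo c (remaining - k) k rest'
  else List.replicate remaining.toNat c :: pvOuter rest k
termination_by (rest.length, 1)
decreasing_by
  · exact Prod.Lex.left _ _ (by simp)
  · exact Prod.Lex.right _ Nat.zero_lt_one
end

-- `desc = ''.join(chr(m + ord('a')) * count[m] for m in range(25, -1, -1))`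
def pvDesc (cs : List Int) : List Char :=
  (PySem.List.pyRange 25 (-1) (-1)).flatMap
    (fun m => List.replicate (PySem.List.pyGetD cs m 0).toNat (Char.ofNat (m.toNat + 97)))

def lex_largest_k_consecutive_alt (string : String) (k_value : Int) : String :=
  String.ofList (PySem.Chars.join []
    (pvOuter (pvDesc (pvCharCount string.toList)) k_value))

-- ===== PRECONDITION & SPEC =====
-- Pre_ excludes (a) strings with a character of code < 71 or > 122, on which A raises
-- IndexError through its 26-slot table (codes 71–96 reach the table by Python's negative-index
-- wrap and A returns normally, so they stay inside), and (b) negative k_value, a corner outside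
-- the natural domain of a run-length cap, where the requirement "at most k consecutive" is
-- unsatisfiable and neither program's output is a specified value.
def Pre_lex_largest_k_consecutive (string : String) (k_value : Int) : Prop :=
  string.toList.all (fun c => 71 ≤ c.toNat && c.toNat ≤ 122) = true ∧ 0 ≤ k_value
instance (string : String) (k_value : Int) : Decidable (Pre_lex_largest_k_consecutive string k_value) := by
  unfold Pre_lex_largest_k_consecutive; infer_instance

def pvWitness_lex_largest_k_consecutive : String × Int := ("baab", 2)

def Spec_lex_largest_k_consecutive (string : String) (k_value : Int) (out : String) : Prop := out = lex_largest_k_consecutive_alt string k_value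
instance (string : String) (k_value : Int) (out : String) : Decidable (Spec_lex_largest_k_consecutive string k_value out) := by unfold Spec_lex_largest_k_consecutive; infer_instance

-- ===== CLAIM (what is proved, stated in full; the proofs are below) =====
def Claim_equal_lex_largest_k_consecutive : Prop := ∀ (string : String) (k_value : Int), Dom_lex_largest_k_consecutive string k_value → Pre_lex_largest_k_consecutive string k_value → Spec_lex_largest_k_consecutive string k_value (lex_largest_k_consecutive string k_value)

-- ===== LEMMAS AND PROOFS =====

lemma pvLex2_1 {a a' b b' : Nat} (h : a < a') : Prod.Lex (· < ·) (· < ·) (a, b) (a', b') :=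
  Prod.Lex.left _ _ h

lemma pvLex2_2 {a b b' : Nat} (h : b < b') : Prod.Lex (· < ·) (· < ·) (a, b) (a, b') :=
  Prod.Lex.right _ h

lemma pvLex2_2e {a b b' c : Nat} (hb : b' = b) (h : c < b') :
    Prod.Lex (· < ·) (· < ·) (a, c) (a, b) :=
  hb ▸ pvLex2_2 h

lemma pvPredNonneg {v : Int} (h0 : 0 ≤ v) (hne : v ≠ 0) : 0 ≤ v - 1 := by
  have h1 : (0 : Int) + 1 ≤ v := Int.lt_iff_add_one_le.mp (h0.lt_of_ne (Ne.symm hne))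
  rw [zero_add] at h1
  exact sub_nonneg.mpr h1

-- A's scanning phase as a function: `j` marching down over zero counts
def pvScanSep (cs : List Int) (j : Int) : Int :=
  if h : 0 ≤ j ∧ PySem.List.pyGetD cs j 0 = 0 then pvScanSep cs (j - 1) else j
termination_by (j + 1).toNat
decreasing_by exact pvDecJ h.1

lemma pvScanSep_le (cs : List Int) (j : Int) : pvScanSep cs j ≤ j := by
  by_cases hco : 0 ≤ j ∧ PySem.List.pyGetD cs j 0 = 0
  · rw [pvScanSep, dif_pos hco]
    exact (pvScanSep_le cs (j - 1)).trans (sub_le_self j zero_le_one)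
  · rw [pvScanSep, dif_neg hco]
termination_by (j + 1).toNat
decreasing_by exact pvDecJ hco.1

lemma pvScanSep_hit (cs : List Int) (j : Int) (h : 0 ≤ pvScanSep cs j) :
    PySem.List.pyGetD cs (pvScanSep cs j) 0 ≠ 0 := by
  by_cases hco : 0 ≤ j ∧ PySem.List.pyGetD cs j 0 = 0
  · rw [pvScanSep, dif_pos hco] at h ⊢
    exact pvScanSep_hit cs (j - 1) h
  · rw [pvScanSep, dif_neg hco] at h ⊢
    exact fun hz => hco ⟨h, hz⟩
termination_by (j + 1).toNat
decreasing_by exact pvDecJ hco.1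

lemma pvNonnegSet (cs : List Int) (i v : Int) (hc : ∀ x ∈ cs, 0 ≤ x) (hv : 0 ≤ v) :
    ∀ x ∈ PySem.List.pySetD cs i v, 0 ≤ x := by
  intro x hx
  unfold PySem.List.pySetD PySem.List.pySet? at hx
  cases hidx : PySem.List.pyIdx? cs.length i with
  | none => rw [hidx] at hx; exact hc x hx
  | some n =>
    rw [hidx] at hx
    rcases List.mem_or_eq_of_mem_set hx with h | h
    · exact hc x h
    · exact h ▸ hv

lemma pvGetD_nonneg (cs : List Int) (i : Int) (hc : ∀ x ∈ cs, 0 ≤ x) :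
    0 ≤ PySem.List.pyGetD cs i 0 := by
  unfold PySem.List.pyGetD
  cases hg : PySem.List.pyGet? cs i with
  | none => exact le_refl 0
  | some a => exact hc a (PySem.List.mem_of_pyGet?_eq_some cs hg)

-- intermediate form of A's loop: one piece per emission, indexed by the current letter m
def pvLoopB (cs : List Int) (m k : Int) (hc : ∀ x ∈ cs, 0 ≤ x) : List (List Char) :=
  if hm : 0 ≤ m then
    if h0 : PySem.List.pyGetD cs m 0 = 0 then
      pvLoopB cs (m - 1) k hc
    else if hck : PySem.List.pyGetD cs m 0 ≤ k then
      pvRepChar m (PySem.List.pyGetD cs m 0) ::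
        pvLoopB (PySem.List.pySetD cs m 0) (m - 1) k (pvNonnegSet cs m 0 hc le_rfl)
    else
      if hj : pvScanSep (PySem.List.pySetD cs m (PySem.List.pyGetD cs m 0 - k)) (m - 1) < 0 then
        [pvRepChar m k]
      else
        pvRepChar m k ::
        [Char.ofNat ((pvScanSep (PySem.List.pySetD cs m (PySem.List.pyGetD cs m 0 - k)) (m - 1)).toNat + 97)] ::
        pvLoopB
          (PySem.List.pySetD (PySem.List.pySetD cs m (PySem.List.pyGetD cs m 0 - k))
            (pvScanSep (PySem.List.pySetD cs m (PySem.List.pyGetD cs m 0 - k)) (m - 1))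
            (PySem.List.pyGetD (PySem.List.pySetD cs m (PySem.List.pyGetD cs m 0 - k))
              (pvScanSep (PySem.List.pySetD cs m (PySem.List.pyGetD cs m 0 - k)) (m - 1)) 0 - 1))
          m k
          (pvNonnegSet _ _ _
            (pvNonnegSet cs m _ hc (sub_nonneg.mpr (le_of_lt (not_le.mp hck))))
            (pvPredNonneg
              (pvGetD_nonneg (PySem.List.pySetD cs m (PySem.List.pyGetD cs m 0 - k))
                (pvScanSep (PySem.List.pySetD cs m (PySem.List.pyGetD cs m 0 - k)) (m - 1))
                (pvNonnegSet cs m _ hc (sub_nonneg.mpr (le_of_lt (not_le.mp hck)))))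
              (pvScanSep_hit (PySem.List.pySetD cs m (PySem.List.pyGetD cs m 0 - k))
                (m - 1) (not_lt.mp hj))))
  else []
termination_by ((m + 1).toNat, pvSlow cs m)
decreasing_by
  · exact pvLex2_1 (pvDecJ hm)
  · exact pvLex2_1 (pvDecJ hm)
  · have hsc : 0 ≤ pvScanSep (PySem.List.pySetD cs m (PySem.List.pyGetD cs m 0 - k)) (m - 1) :=
      not_lt.mp hj
    have hz := pvScanSep_hit (PySem.List.pySetD cs m (PySem.List.pyGetD cs m 0 - k)) (m - 1) hsc
    have hnn := pvGetD_nonneg (PySem.List.pySetD cs m (PySem.List.pyGetD cs m 0 - k))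
      (pvScanSep (PySem.List.pySetD cs m (PySem.List.pyGetD cs m 0 - k)) (m - 1))
      (pvNonnegSet cs m _ hc (sub_nonneg.mpr (le_of_lt (not_le.mp hck))))
    exact pvLex2_2e (pvSlow_set_ge cs m m (PySem.List.pyGetD cs m 0 - k) hm le_rfl)
      (pvSlow_set_dec (PySem.List.pySetD cs m (PySem.List.pyGetD cs m 0 - k)) m
        (pvScanSep (PySem.List.pySetD cs m (PySem.List.pyGetD cs m 0 - k)) (m - 1))
        hsc
        (lt_of_le_of_lt (pvScanSep_le (PySem.List.pySetD cs m (PySem.List.pyGetD cs m 0 - k)) (m - 1))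
          (sub_lt_self m zero_lt_one))
        (hnn.lt_of_ne (Ne.symm hz)))

lemma pvCharCount_nonneg (s : List Char) : ∀ x ∈ pvCharCount s, 0 ≤ x := by
  unfold pvCharCount
  have h : ∀ (cc : List Int), (∀ x ∈ cc, 0 ≤ x) →
      ∀ x ∈ s.foldl (fun cc c =>
          PySem.List.pySetD cc ((c.toNat : Int) - 97)
            (PySem.List.pyGetD cc ((c.toNat : Int) - 97) 0 + 1)) cc, 0 ≤ x := by
    induction s with
    | nil => intro cc hcc; exact hcc
    | cons c cs ih =>
      intro cc hcc
      exact ih _ (pvNonnegSet _ _ _ hcc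
        (add_nonneg (pvGetD_nonneg cc ((c.toNat : Int) - 97) hcc) zero_le_one))
  exact h _ (fun x hx => (List.eq_of_mem_replicate hx) ▸ le_rfl)

lemma pvJoin_nil : PySem.Chars.join [] [] = [] := by
  decide

lemma pvJoin_cons (p : List Char) (ps : List (List Char)) :
    PySem.Chars.join [] (p :: ps) = p ++ PySem.Chars.join [] ps := by
  simp [PySem.Chars.join, List.intercalate]
  cases ps <;> simp [List.intersperse]

-- A's scanning phase (j < m) reaches exactly the state pvScanSep computes
lemma pvScanEq (cs : List Int) (m j k : Int) (res : List Char)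
    (hc : ∀ x ∈ cs, 0 ≤ x) (hm : 0 ≤ m) (hjm : j < m) :
    pvLoopA cs m j k res =
      if pvScanSep cs j < 0 then res
      else
        pvLoopA
          (PySem.List.pySetD cs (pvScanSep cs j)
            (PySem.List.pyGetD cs (pvScanSep cs j) 0 - 1)) m m k
          (res ++ [Char.ofNat ((pvScanSep cs j).toNat + 97)]) := by
  by_cases hj0 : 0 ≤ j
  · rw [pvLoopA, dif_pos ⟨hm, hj0⟩, dif_neg (by omega : ¬ j = m)]
    by_cases h3 : 0 < PySem.List.pyGetD cs j 0
    · rw [dif_pos h3, pvScanSep, dif_neg (by omega)]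
      rw [if_neg (by omega)]
    · rw [dif_neg h3]
      have hz : PySem.List.pyGetD cs j 0 = 0 :=
        le_antisymm (not_lt.mp h3) (pvGetD_nonneg cs j hc)
      rw [pvScanSep, dif_pos ⟨hj0, hz⟩]
      exact pvScanEq cs m (j - 1) k res hc hm (by omega)
  · rw [pvLoopA, dif_neg (by omega), pvScanSep, dif_neg (by omega), if_pos (by omega)]
termination_by (j + 1).toNat
decreasing_by omega

-- A's loop equals the per-emission piece list pvLoopB
lemma pvMain (cs : List Int) (m k : Int) (res : List Char)
    (hc : ∀ x ∈ cs, 0 ≤ x) (hk : 0 ≤ k) :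
    pvLoopA cs m m k res = res ++ PySem.Chars.join [] (pvLoopB cs m k hc) := by
  by_cases hm : 0 ≤ m
  · have hcm := pvGetD_nonneg cs m hc
    rw [pvLoopA, pvLoopB, dif_pos ⟨hm, hm⟩, dif_pos rfl, dif_pos hm]
    by_cases h0 : PySem.List.pyGetD cs m 0 = 0
    · rw [dif_neg (by omega), dif_neg (by omega), dif_pos h0]
      exact pvMain cs (m - 1) k res hc hk
    · by_cases hck : PySem.List.pyGetD cs m 0 ≤ k
      · rw [dif_neg (by omega), dif_pos (by omega), dif_neg h0, dif_pos hck]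
        rw [pvMain (PySem.List.pySetD cs m 0) (m - 1) k _ (pvNonnegSet cs m 0 hc le_rfl) hk]
        rw [pvJoin_cons]
        simp [List.append_assoc]
      · rw [dif_pos (by omega), dif_neg h0, dif_neg hck]
        have hc' : ∀ x ∈ PySem.List.pySetD cs m (PySem.List.pyGetD cs m 0 - k), 0 ≤ x :=
          pvNonnegSet cs m _ hc (by omega)
        rw [pvScanEq (PySem.List.pySetD cs m (PySem.List.pyGetD cs m 0 - k)) m (m - 1) k
          (res ++ pvRepChar m k) hc' hm (by omega)]
        by_cases hj : pvScanSep (PySem.List.pySetD cs m (PySem.List.pyGetD cs m 0 - k)) (m - 1) < 0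
        · rw [if_pos hj, dif_pos hj]
          simp [PySem.Chars.join, List.intercalate, List.intersperse]
        · rw [if_neg hj, dif_neg hj]
          have hnn := pvGetD_nonneg (PySem.List.pySetD cs m (PySem.List.pyGetD cs m 0 - k))
            (pvScanSep (PySem.List.pySetD cs m (PySem.List.pyGetD cs m 0 - k)) (m - 1)) hc'
          have hc'' : ∀ x ∈ PySem.List.pySetD (PySem.List.pySetD cs m (PySem.List.pyGetD cs m 0 - k))
              (pvScanSep (PySem.List.pySetD cs m (PySem.List.pyGetD cs m 0 - k)) (m - 1))
              (PySem.List.pyGetD (PySem.List.pySetD cs m (PySem.List.pyGetD cs m 0 - k))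
                (pvScanSep (PySem.List.pySetD cs m (PySem.List.pyGetD cs m 0 - k)) (m - 1)) 0 - 1),
              0 ≤ x := by
            refine pvNonnegSet _ _ _ hc' ?_
            have hz := pvScanSep_hit (PySem.List.pySetD cs m (PySem.List.pyGetD cs m 0 - k))
              (m - 1) (by omega)
            omega
          rw [pvMain _ m k _ hc'' hk, pvJoin_cons, pvJoin_cons]
          simp [List.append_assoc]
  · rw [pvLoopA, pvLoopB, dif_neg (by omega), dif_neg hm, pvJoin_nil, List.append_nil]
termination_by ((m + 1).toNat, pvSlow cs m)
decreasing_by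
  · simp only [Prod.lex_iff]; omega
  · simp only [Prod.lex_iff]; omega
  · have hz := pvScanSep_hit (PySem.List.pySetD cs m (PySem.List.pyGetD cs m 0 - k)) (m - 1)
      (by omega)
    have hle := pvScanSep_le (PySem.List.pySetD cs m (PySem.List.pyGetD cs m 0 - k)) (m - 1)
    have hdec := pvSlow_set_dec (PySem.List.pySetD cs m (PySem.List.pyGetD cs m 0 - k)) m
      (pvScanSep (PySem.List.pySetD cs m (PySem.List.pyGetD cs m 0 - k)) (m - 1))
      (by omega) (by omega) (by omega)
    have heq := pvSlow_set_ge cs m m (PySem.List.pyGetD cs m 0 - k) hm le_rfl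
    simp only [Prod.lex_iff]
    exact Or.inr ⟨trivial, heq ▸ hdec⟩

-- ===== bridge: pvLoopB over the counts equals pvOuter over the flattened descending string =====

-- pvDescN cs n: the flattened descending string of the letters with index < n
def pvDescN (cs : List Int) : Nat → List Char
  | 0 => []
  | Nat.succ n =>
      List.replicate (PySem.List.pyGetD cs (n : Int) 0).toNat (Char.ofNat (n + 97)) ++ pvDescN cs n

lemma pvCharToNat (a : Nat) (h : a ≤ 25) : (Char.ofNat (a + 97)).toNat = a + 97 := by
  have hv : (a + 97).isValidChar := Or.inl (by omega)
  simp [Char.ofNat, hv, Char.toNat, Char.ofNatAux]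
  omega

lemma pvDesc_eq_aux (cs : List Int) :
    ∀ (n : Nat),
      (PySem.List.pyRange ((n : Int) - 1) (-1) (-1)).flatMap
        (fun m => List.replicate (PySem.List.pyGetD cs m 0).toNat (Char.ofNat (m.toNat + 97))) =
      pvDescN cs n := by
  intro n
  induction n with
  | zero =>
    rw [PySem.List.pyRange_neg_one_eq_nil (by norm_num)]
    rfl
  | succ n ih =>
    have hc : ((n + 1 : Nat) : Int) - 1 = (n : Int) := by push_cast; ring
    rw [hc, PySem.List.pyRange_neg_one_cons (by omega), List.flatMap_cons, pvDescN]
    rw [Int.toNat_natCast]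
    exact congrArg _ ih

lemma pvDesc_eq (cs : List Int) : pvDesc cs = pvDescN cs 26 := by
  have h := pvDesc_eq_aux cs 26
  rw [show ((26 : Nat) : Int) - 1 = 25 from by norm_num] at h
  exact h

lemma pvDescN_mem_lt (cs : List Int) :
    ∀ (n : Nat), n ≤ 26 → ∀ x ∈ pvDescN cs n, x.toNat < n + 97 := by
  intro n
  induction n with
  | zero => intro _ x hx; exact absurd hx (List.not_mem_nil)
  | succ n ih =>
    intro hn x hx
    rw [pvDescN, List.mem_append] at hx
    rcases hx with hx | hx
    · rw [List.eq_of_mem_replicate hx, pvCharToNat n (by omega)]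
      omega
    · exact lt_trans (ih (by omega) x hx) (by omega)

lemma pvRunLen_nonself (c : Char) (t : List Char) (ht : ∀ x ∈ t.head?, x ≠ c) :
    pvRunLen c t = 0 := by
  cases t with
  | nil => rfl
  | cons x xs =>
    have hx : x ≠ c := ht x (by simp)
    simp [pvRunLen, hx]

lemma pvRunLen_repl (c : Char) (a : Nat) (t : List Char) (ht : ∀ x ∈ t.head?, x ≠ c) :
    pvRunLen c (List.replicate a c ++ t) = a := by
  induction a with
  | zero => simpa using pvRunLen_nonself c t ht
  | succ a ih => simp [List.replicate_succ, pvRunLen, ih]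

lemma pvOuter_cons (c : Char) (t : List Char) (k : Int) :
    pvOuter (c :: t) k =
      pvGo c ((pvRunLen c (c :: t) : Nat) : Int) k ((c :: t).drop (pvRunLen c (c :: t))) := by
  rw [pvOuter]

lemma pvOuter_block (c : Char) (a : Nat) (ha : 0 < a) (T : List Char)
    (hT : ∀ x ∈ T.head?, x ≠ c) (k : Int) :
    pvOuter (List.replicate a c ++ T) k = pvGo c (a : Int) k T := by
  obtain ⟨b, rfl⟩ : ∃ b, a = b + 1 := ⟨a - 1, by omega⟩
  have hform : List.replicate (b + 1) c ++ T = c :: (List.replicate b c ++ T) := by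
    rw [List.replicate_succ, List.cons_append]
  have hrun : pvRunLen c (c :: (List.replicate b c ++ T)) = b + 1 := by
    rw [← hform]
    exact pvRunLen_repl c (b + 1) T hT
  have hdrop : (c :: (List.replicate b c ++ T)).drop (b + 1) = T := by
    rw [← hform]
    exact List.drop_left' (by simp)
  rw [hform, pvOuter_cons, hrun, hdrop]

lemma pvGetD_set_ne (cs : List Int) (i j v : Int) (hi : 0 ≤ i) (hj : 0 ≤ j) (hne : i ≠ j) :
    PySem.List.pyGetD (PySem.List.pySetD cs i v) j 0 = PySem.List.pyGetD cs j 0 := by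
  rw [pvSetD_nonneg_eq _ _ _ hi, pvGetD_nonneg_eq _ _ hj, pvGetD_nonneg_eq _ _ hj]
  have hne' : i.toNat ≠ j.toNat := by omega
  simp [List.getD, List.getElem?_set_ne hne']

lemma pvGetD_pos_len (cs : List Int) (i : Int) (hi : 0 ≤ i)
    (h : 0 < PySem.List.pyGetD cs i 0) : i.toNat < cs.length := by
  rw [pvGetD_nonneg_eq _ _ hi] at h
  by_contra hge
  rw [List.getD_eq_default cs 0 (not_lt.mp hge)] at h
  exact absurd h (lt_irrefl 0)

lemma pvGetD_set_self (cs : List Int) (i v : Int) (hi : 0 ≤ i) (hlen : i.toNat < cs.length) :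
    PySem.List.pyGetD (PySem.List.pySetD cs i v) i 0 = v := by
  rw [pvSetD_nonneg_eq _ _ _ hi, pvGetD_nonneg_eq _ _ hi]
  simp [List.getD, hlen]

lemma pvDescN_set_out (cs : List Int) (v i : Int) (hi : 0 ≤ i) :
    ∀ (n : Nat), (n : Int) ≤ i → pvDescN (PySem.List.pySetD cs i v) n = pvDescN cs n := by
  intro n
  induction n with
  | zero => intro _; rfl
  | succ n ih =>
    intro hn
    rw [pvDescN, pvDescN, pvGetD_set_ne cs i (n : Int) v hi (by positivity) (by omega),
      ih (by omega)]

lemma pvDescN_nil (cs : List Int) (hc : ∀ x ∈ cs, 0 ≤ x) :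
    ∀ (n : Nat), pvDescN cs n = [] →
      ∀ (i : Nat), i < n → PySem.List.pyGetD cs (i : Int) 0 = 0 := by
  intro n
  induction n with
  | zero => intro _ i hi; omega
  | succ n ih =>
    intro hn i hi
    rw [pvDescN, List.append_eq_nil_iff] at hn
    rcases Nat.lt_succ_iff_lt_or_eq.mp hi with hlt | rfl
    · exact ih hn.2 i hlt
    · have h1 : (PySem.List.pyGetD cs (i : Int) 0).toNat = 0 := by
        have := hn.1
        rwa [List.replicate_eq_nil_iff] at this
      have h2 := pvGetD_nonneg cs (i : Int) hc
      omega

lemma pvDescN_split (cs : List Int) (q : Nat) :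
    ∀ (n : Nat), q < n →
      (∀ (i : Nat), q < i → i < n → PySem.List.pyGetD cs (i : Int) 0 = 0) →
      pvDescN cs n =
        List.replicate (PySem.List.pyGetD cs (q : Int) 0).toNat (Char.ofNat (q + 97)) ++
          pvDescN cs q := by
  intro n
  induction n with
  | zero => intro h; omega
  | succ n ih =>
    intro hq hz
    rcases Nat.lt_succ_iff_lt_or_eq.mp hq with hlt | rfl
    · rw [pvDescN, hz n hlt (by omega), ih hlt (fun i h1 h2 => hz i h1 (by omega))]
      simp
    · rfl

lemma pvDescN_max (cs : List Int) (hc : ∀ x ∈ cs, 0 ≤ x) :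
    ∀ (n : Nat), pvDescN cs n ≠ [] →
      ∃ q : Nat, q < n ∧ 0 < PySem.List.pyGetD cs (q : Int) 0 ∧
        ∀ (i : Nat), q < i → i < n → PySem.List.pyGetD cs (i : Int) 0 = 0 := by
  intro n
  induction n with
  | zero => intro h; exact absurd rfl h
  | succ n ih =>
    intro hne
    by_cases hn : 0 < PySem.List.pyGetD cs (n : Int) 0
    · exact ⟨n, by omega, hn, fun i h1 h2 => by omega⟩
    · have hz : PySem.List.pyGetD cs (n : Int) 0 = 0 :=
        le_antisymm (not_lt.mp hn) (pvGetD_nonneg cs (n : Int) hc)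
      have hform : pvDescN cs (n + 1) = pvDescN cs n := by
        rw [pvDescN, hz]
        simp
      rw [hform] at hne
      obtain ⟨q, hq1, hq2, hq3⟩ := ih hne
      refine ⟨q, by omega, hq2, fun i h1 h2 => ?_⟩
      rcases Nat.lt_succ_iff_lt_or_eq.mp h2 with hlt | rfl
      · exact hq3 i h1 hlt
      · exact hz

lemma pvScanSep_neg (cs : List Int) :
    ∀ (j : Int), (∀ (i : Nat), (i : Int) ≤ j → PySem.List.pyGetD cs (i : Int) 0 = 0) →
      pvScanSep cs j < 0 := by
  intro j hz
  by_cases hco : 0 ≤ j ∧ PySem.List.pyGetD cs j 0 = 0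
  · rw [pvScanSep, dif_pos hco]
    exact pvScanSep_neg cs (j - 1) (fun i hi => hz i (by omega))
  · rw [pvScanSep, dif_neg hco]
    by_contra hge
    rw [not_lt] at hge
    have hj : (j.toNat : Int) = j := Int.toNat_of_nonneg hge
    exact hco ⟨hge, by rw [← hj]; exact hz j.toNat (by omega)⟩
termination_by j => (j + 1).toNat
decreasing_by exact pvDecJ hco.1

lemma pvScanSep_pos (cs : List Int) (q : Nat) (hq : 0 < PySem.List.pyGetD cs (q : Int) 0) :
    ∀ (j : Int), (q : Int) ≤ j →
      (∀ (i : Nat), q < i → (i : Int) ≤ j → PySem.List.pyGetD cs (i : Int) 0 = 0) →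
      pvScanSep cs j = (q : Int) := by
  intro j hqj hz
  by_cases hco : 0 ≤ j ∧ PySem.List.pyGetD cs j 0 = 0
  · rw [pvScanSep, dif_pos hco]
    have hne : (q : Int) ≠ j := by
      intro h
      rw [← h] at hco
      omega
    exact pvScanSep_pos cs q hq (j - 1) (by omega) (fun i h1 h2 => hz i h1 (by omega))
  · rw [pvScanSep, dif_neg hco]
    have hj0 : 0 ≤ j := le_trans (by positivity) hqj
    have hnz : PySem.List.pyGetD cs j 0 ≠ 0 := fun h => hco ⟨hj0, h⟩
    have hj : (j.toNat : Int) = j := Int.toNat_of_nonneg hj0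
    by_contra hne
    have hqlt : q < j.toNat := by omega
    exact hnz (by rw [← hj]; exact hz j.toNat hqlt (by omega))
termination_by j => (j + 1).toNat
decreasing_by exact pvDecJ hco.1

lemma pvSumSetLe (L : List Nat) : ∀ (n v : Nat), v ≤ L.getD n 0 → (L.set n v).sum ≤ L.sum := by
  induction L with
  | nil => intro n v _; simp
  | cons a t ih =>
    intro n v hv
    cases n with
    | zero =>
      rw [List.set_cons_zero, List.sum_cons, List.sum_cons]
      exact Nat.add_le_add_right (by simpa using hv) t.sum
    | succ n =>
      rw [List.set_cons_succ, List.sum_cons, List.sum_cons]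
      exact Nat.add_le_add_left (ih n v (by simpa using hv)) a

lemma pvSlow_set_le (cs : List Int) (m i v : Int) (hi : 0 ≤ i) (_h0 : 0 ≤ v)
    (hv : v ≤ PySem.List.pyGetD cs i 0) : pvSlow (PySem.List.pySetD cs i v) m ≤ pvSlow cs m := by
  rw [pvSetD_nonneg_eq _ _ _ hi]
  unfold pvSlow
  rw [List.take_set, List.map_set]
  by_cases hin : i.toNat < ((cs.take m.toNat).map Int.toNat).length
  · refine pvSumSetLe _ i.toNat v.toNat ?_
    rw [pvGetD_nonneg_eq _ _ hi] at hv
    rw [List.getD_eq_getElem _ 0 hin, List.getElem_map, List.getElem_take]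
    have hlen : i.toNat < cs.length := by
      rw [List.length_map, List.length_take] at hin
      omega
    rw [List.getD_eq_getElem cs 0 hlen] at hv
    omega
  · rw [List.set_eq_of_length_le (not_lt.mp hin)]

lemma pvGo_nil (c : Char) (remaining k : Int) (h : k < remaining) :
    pvGo c remaining k [] = [List.replicate k.toNat c] := by
  rw [pvGo.eq_def, if_pos h]

lemma pvGo_cons (c : Char) (remaining k : Int) (s : Char) (rest' : List Char)
    (h : k < remaining) :
    pvGo c remaining k (s :: rest') =
      List.replicate k.toNat c :: [s] :: pvGo c (remaining - k) k rest' := by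
  rw [pvGo.eq_def, if_pos h]

lemma pvGo_le (c : Char) (remaining k : Int) (rest : List Char) (h : ¬ k < remaining) :
    pvGo c remaining k rest = List.replicate remaining.toNat c :: pvOuter rest k := by
  rw [pvGo.eq_def, if_neg h]

lemma pvDescN_succ (cs : List Int) (n : Nat) :
    pvDescN cs (n + 1) =
      List.replicate (PySem.List.pyGetD cs (n : Int) 0).toNat (Char.ofNat (n + 97)) ++
        pvDescN cs n := rfl

lemma pvBridge (cs : List Int) (n : Nat) (k : Int) (hk : 0 ≤ k) (hn : n ≤ 26)
    (hc : ∀ x ∈ cs, 0 ≤ x) :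
    PySem.Chars.join [] (pvOuter (pvDescN cs n) k) =
      PySem.Chars.join [] (pvLoopB cs ((n : Int) - 1) k hc) := by
  cases n with
  | zero =>
    rw [pvLoopB, dif_neg (by norm_num)]
    rw [show pvDescN cs 0 = ([] : List Char) from rfl, pvOuter]
  | succ n =>
    have hcast : ((n + 1 : Nat) : Int) - 1 = (n : Int) := by push_cast; ring
    rw [hcast]
    have hn0 : (0 : Int) ≤ (n : Int) := Int.natCast_nonneg n
    have hc0 : 0 ≤ PySem.List.pyGetD cs (n : Int) 0 := pvGetD_nonneg cs _ hc
    have hchn : (Char.ofNat (n + 97)).toNat = n + 97 := pvCharToNat n (by omega)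
    have hThead : ∀ x ∈ (pvDescN cs n).head?, x ≠ Char.ofNat (n + 97) := by
      intro x hx heq
      have hmem : x ∈ pvDescN cs n := List.mem_of_mem_head? hx
      have hlt := pvDescN_mem_lt cs n (by omega) x hmem
      rw [heq, hchn] at hlt
      omega
    rw [pvLoopB, dif_pos hn0]
    by_cases h0 : PySem.List.pyGetD cs (n : Int) 0 = 0
    · rw [dif_pos h0]
      have hform : pvDescN cs (n + 1) = pvDescN cs n := by
        rw [pvDescN_succ, h0]
        simp
      rw [hform]
      exact pvBridge cs n k hk (by omega) hc
    · rw [dif_neg h0]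
      have hcpos : 0 < PySem.List.pyGetD cs (n : Int) 0 := by omega
      have hlen : (n : Int).toNat < cs.length := pvGetD_pos_len cs (n : Int) hn0 hcpos
      have hblock : pvOuter (pvDescN cs (n + 1)) k =
          pvGo (Char.ofNat (n + 97)) ((PySem.List.pyGetD cs (n : Int) 0).toNat : Int) k
            (pvDescN cs n) := by
        rw [pvDescN_succ]
        exact pvOuter_block _ _ (by omega) _ hThead k
      have hcast2 : ((PySem.List.pyGetD cs (n : Int) 0).toNat : Int) =
          PySem.List.pyGetD cs (n : Int) 0 := Int.toNat_of_nonneg hc0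
      by_cases hck : PySem.List.pyGetD cs (n : Int) 0 ≤ k
      · rw [dif_pos hck, hblock, hcast2, pvGo_le _ _ _ _ (not_lt.mpr hck)]
        rw [pvJoin_cons, pvJoin_cons]
        have hTset : pvDescN (PySem.List.pySetD cs (n : Int) 0) n = pvDescN cs n :=
          pvDescN_set_out cs 0 (n : Int) hn0 n le_rfl
        have hrec := pvBridge (PySem.List.pySetD cs (n : Int) 0) n k hk (by omega)
          (pvNonnegSet cs (n : Int) 0 hc le_rfl)
        rw [hTset] at hrec
        rw [← hrec]
        simp [pvRepChar]
      · rw [dif_neg hck]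
        have hklt : k < PySem.List.pyGetD cs (n : Int) 0 := not_le.mp hck
        have hc' : ∀ x ∈ PySem.List.pySetD cs (n : Int) (PySem.List.pyGetD cs (n : Int) 0 - k),
            0 ≤ x := pvNonnegSet cs (n : Int) _ hc (by omega)
        cases hT : pvDescN cs n with
        | nil =>
          have hzeros := pvDescN_nil cs hc n hT
          have hsc : pvScanSep
              (PySem.List.pySetD cs (n : Int) (PySem.List.pyGetD cs (n : Int) 0 - k))
              ((n : Int) - 1) < 0 := by
            refine pvScanSep_neg _ _ (fun i hi => ?_)
            rw [pvGetD_set_ne cs (n : Int) (i : Int) _ hn0 (Int.natCast_nonneg i) (by omega)]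
            exact hzeros i (by omega)
          rw [dif_pos hsc, hblock, hcast2, hT, pvGo_nil _ _ _ hklt]
          simp [pvRepChar]
        | cons s T' =>
          obtain ⟨q, hq1, hq2, hq3⟩ := pvDescN_max cs hc n (by rw [hT]; simp)
          have hq0 : (0 : Int) ≤ (q : Int) := Int.natCast_nonneg q
          have hsplit := pvDescN_split cs q n hq1 hq3
          obtain ⟨a, ha⟩ : ∃ a, (PySem.List.pyGetD cs (q : Int) 0).toNat = a + 1 :=
            ⟨(PySem.List.pyGetD cs (q : Int) 0).toNat - 1, by omega⟩
          rw [ha, List.replicate_succ, List.cons_append] at hsplit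
          have hcons := hT.symm.trans hsplit
          rw [List.cons_eq_cons] at hcons
          obtain ⟨hs, hT'⟩ := hcons
          -- the scan over the updated counts finds exactly q
          have hgq' : PySem.List.pyGetD
              (PySem.List.pySetD cs (n : Int) (PySem.List.pyGetD cs (n : Int) 0 - k))
              (q : Int) 0 = PySem.List.pyGetD cs (q : Int) 0 :=
            pvGetD_set_ne cs (n : Int) (q : Int) _ hn0 hq0 (by omega)
          have hscan : pvScanSep
              (PySem.List.pySetD cs (n : Int) (PySem.List.pyGetD cs (n : Int) 0 - k))
              ((n : Int) - 1) = (q : Int) := by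
            refine pvScanSep_pos _ q (by rw [hgq']; exact hq2) _ (by omega)
              (fun i h1 h2 => ?_)
            rw [pvGetD_set_ne cs (n : Int) (i : Int) _ hn0 (Int.natCast_nonneg i) (by omega)]
            exact hq3 i h1 (by omega)
          rw [dif_neg (by rw [hscan]; omega)]
          simp only [hscan]
          -- name the twice-updated counts
          have hq2' : 0 < PySem.List.pyGetD
              (PySem.List.pySetD cs (n : Int) (PySem.List.pyGetD cs (n : Int) 0 - k))
              (q : Int) 0 := by rw [hgq']; exact hq2
          have hqlen : (q : Int).toNat <
              (PySem.List.pySetD cs (n : Int) (PySem.List.pyGetD cs (n : Int) 0 - k)).length :=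
            pvGetD_pos_len _ (q : Int) hq0 hq2'
          have hc'' : ∀ x ∈ PySem.List.pySetD
              (PySem.List.pySetD cs (n : Int) (PySem.List.pyGetD cs (n : Int) 0 - k))
              (q : Int)
              (PySem.List.pyGetD
                (PySem.List.pySetD cs (n : Int) (PySem.List.pyGetD cs (n : Int) 0 - k))
                (q : Int) 0 - 1), 0 ≤ x :=
            pvNonnegSet _ (q : Int) _ hc' (by omega)
          -- structure of the flattened string after the two updates
          have e1 : PySem.List.pyGetD
              (PySem.List.pySetD cs (n : Int) (PySem.List.pyGetD cs (n : Int) 0 - k))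
              (n : Int) 0 = PySem.List.pyGetD cs (n : Int) 0 - k :=
            pvGetD_set_self cs (n : Int) _ hn0 hlen
          have e2 : PySem.List.pyGetD
              (PySem.List.pySetD
                (PySem.List.pySetD cs (n : Int) (PySem.List.pyGetD cs (n : Int) 0 - k))
                (q : Int)
                (PySem.List.pyGetD
                  (PySem.List.pySetD cs (n : Int) (PySem.List.pyGetD cs (n : Int) 0 - k))
                  (q : Int) 0 - 1))
              (n : Int) 0 = PySem.List.pyGetD cs (n : Int) 0 - k := by
            rw [pvGetD_set_ne _ (q : Int) (n : Int) _ hq0 hn0 (by omega)]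
            exact e1
          have e3 : PySem.List.pyGetD
              (PySem.List.pySetD
                (PySem.List.pySetD cs (n : Int) (PySem.List.pyGetD cs (n : Int) 0 - k))
                (q : Int)
                (PySem.List.pyGetD
                  (PySem.List.pySetD cs (n : Int) (PySem.List.pyGetD cs (n : Int) 0 - k))
                  (q : Int) 0 - 1))
              (q : Int) 0 = PySem.List.pyGetD cs (q : Int) 0 - 1 := by
            rw [pvGetD_set_self _ (q : Int) _ hq0 hqlen, hgq']
          have hdescq : pvDescN
              (PySem.List.pySetD
                (PySem.List.pySetD cs (n : Int) (PySem.List.pyGetD cs (n : Int) 0 - k))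
                (q : Int)
                (PySem.List.pyGetD
                  (PySem.List.pySetD cs (n : Int) (PySem.List.pyGetD cs (n : Int) 0 - k))
                  (q : Int) 0 - 1))
              q = pvDescN cs q := by
            rw [pvDescN_set_out _ _ (q : Int) hq0 q le_rfl,
              pvDescN_set_out cs _ (n : Int) hn0 q (by omega)]
          have hzeros'' : ∀ (i : Nat), q < i → i < n →
              PySem.List.pyGetD
                (PySem.List.pySetD
                  (PySem.List.pySetD cs (n : Int) (PySem.List.pyGetD cs (n : Int) 0 - k))
                  (q : Int)
                  (PySem.List.pyGetD
                    (PySem.List.pySetD cs (n : Int) (PySem.List.pyGetD cs (n : Int) 0 - k))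
                    (q : Int) 0 - 1))
                (i : Int) 0 = 0 := by
            intro i h1 h2
            rw [pvGetD_set_ne _ (q : Int) (i : Int) _ hq0 (Int.natCast_nonneg i) (by omega),
              pvGetD_set_ne cs (n : Int) (i : Int) _ hn0 (Int.natCast_nonneg i) (by omega)]
            exact hq3 i h1 h2
          have hdescn : pvDescN
              (PySem.List.pySetD
                (PySem.List.pySetD cs (n : Int) (PySem.List.pyGetD cs (n : Int) 0 - k))
                (q : Int)
                (PySem.List.pyGetD
                  (PySem.List.pySetD cs (n : Int) (PySem.List.pyGetD cs (n : Int) 0 - k))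
                  (q : Int) 0 - 1))
              n = T' := by
            rw [pvDescN_split _ q n hq1 hzeros'', e3, hdescq, hT']
            congr 1
            congr 1
            omega
          have hdesc1 : pvDescN
              (PySem.List.pySetD
                (PySem.List.pySetD cs (n : Int) (PySem.List.pyGetD cs (n : Int) 0 - k))
                (q : Int)
                (PySem.List.pyGetD
                  (PySem.List.pySetD cs (n : Int) (PySem.List.pyGetD cs (n : Int) 0 - k))
                  (q : Int) 0 - 1))
              (n + 1) =
              List.replicate (PySem.List.pyGetD cs (n : Int) 0 - k).toNat
                (Char.ofNat (n + 97)) ++ T' := by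
            rw [pvDescN_succ, e2, hdescn]
          -- heads of T' are below letter n
          have hT'head : ∀ x ∈ T'.head?, x ≠ Char.ofNat (n + 97) := by
            intro x hx heq
            have hmem : x ∈ pvDescN cs n := by
              rw [hT]
              exact List.mem_cons_of_mem s (List.mem_of_mem_head? hx)
            have hlt := pvDescN_mem_lt cs n (by omega) x hmem
            rw [heq, hchn] at hlt
            omega
          have hblock2 : pvOuter
              (List.replicate (PySem.List.pyGetD cs (n : Int) 0 - k).toNat
                (Char.ofNat (n + 97)) ++ T') k =
              pvGo (Char.ofNat (n + 97)) (PySem.List.pyGetD cs (n : Int) 0 - k) k T' := by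
            rw [pvOuter_block _ _ (by omega) _ hT'head k,
              Int.toNat_of_nonneg (by omega : (0 : Int) ≤ PySem.List.pyGetD cs (n : Int) 0 - k)]
          -- the measure facts for the recursive call
          have hs1 : pvSlow
              (PySem.List.pySetD cs (n : Int) (PySem.List.pyGetD cs (n : Int) 0 - k))
              ((n + 1 : Nat) : Int) ≤ pvSlow cs ((n + 1 : Nat) : Int) :=
            pvSlow_set_le cs _ (n : Int) _ hn0 (by omega) (by omega)
          have hmeas : pvSlow
              (PySem.List.pySetD
                (PySem.List.pySetD cs (n : Int) (PySem.List.pyGetD cs (n : Int) 0 - k))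
                (q : Int)
                (PySem.List.pyGetD
                  (PySem.List.pySetD cs (n : Int) (PySem.List.pyGetD cs (n : Int) 0 - k))
                  (q : Int) 0 - 1))
              ((n + 1 : Nat) : Int) < pvSlow cs ((n + 1 : Nat) : Int) :=
            lt_of_lt_of_le
              (pvSlow_set_dec _ ((n + 1 : Nat) : Int) (q : Int) hq0 (by push_cast; omega) hq2')
              hs1
          have hrec := pvBridge
            (PySem.List.pySetD
              (PySem.List.pySetD cs (n : Int) (PySem.List.pyGetD cs (n : Int) 0 - k))
              (q : Int)
              (PySem.List.pyGetD
                (PySem.List.pySetD cs (n : Int) (PySem.List.pyGetD cs (n : Int) 0 - k))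
                (q : Int) 0 - 1))
            (n + 1) k hk hn hc''
          rw [hcast, hdesc1, hblock2] at hrec
          -- assemble both sides
          rw [hblock, hcast2, hT, pvGo_cons _ _ _ _ _ hklt]
          rw [pvJoin_cons, pvJoin_cons, pvJoin_cons, pvJoin_cons]
          rw [← hrec]
          simp [pvRepChar, hs]
termination_by (n, pvSlow cs (n : Int))
decreasing_by
  · simp only [Prod.lex_iff]
    omega
  · simp only [Prod.lex_iff]
    omega
  · simp only [Prod.lex_iff]
    right
    refine ⟨by omega, ?_⟩
    convert hmeas using 2
    omega

-- ===== VERDICT (by name: the statement is the Claim_ definition above) =====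
theorem lex_largest_k_consecutive_spec : Claim_equal_lex_largest_k_consecutive := by
  intro s k _ hpre
  unfold Spec_lex_largest_k_consecutive lex_largest_k_consecutive lex_largest_k_consecutive_alt
  have hc := pvCharCount_nonneg s.toList
  have hmain := pvMain (pvCharCount s.toList) 25 k [] hc hpre.2
  have hbr := pvBridge (pvCharCount s.toList) 26 k hpre.2 le_rfl hc
  rw [show ((26 : Nat) : Int) - 1 = 25 from by norm_num] at hbr
  rw [hmain, List.nil_append, pvDesc_eq, hbr]
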